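-- pv_equiv track=rewrite | github.com/naivecynics/abc-utils | mess.py | _norm_brace_token
-- ===== SOURCE A (Python) =====
-- def _split_top_level_pipes(s: str) -> list[str]:
--     """只在顶层分割 '|'，括号/大括号内的 '|' 会被忽略。"""
--     out, buf, lvl = [], [], 0
--     for ch in s:
--         if ch in "({":
--             lvl += 1
--             buf.append(ch)
--         elif ch in ")}":
--             lvl -= 1
--             buf.append(ch)
--         elif ch == "|" and lvl == 0:
--             tok = "".join(buf).strip()
--             if tok:
--                 out.append(tok)
--             buf = []
--         else:
--             buf.append(ch)
--     tok = "".join(buf).strip()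
--     if tok:
--         out.append(tok)
--     return out
--
-- def _norm_paren_token(s: str) -> str:
--     # "(5|7|8)" -> "( 5 7 8 )"; 单个数 -> "5"
--     inner = s.strip()[1:-1].strip()
--     nums = [int(x) for x in inner.split("|") if x.strip().isdigit()]
--     if not nums:
--         return "( )"
--     return str(nums[0]) if len(nums) == 1 else "( " + " ".join(map(str, nums)) + " )"
--
-- def _norm_brace_token(s: str) -> str:
--     # "{(5|7|8)|(6|9|10)}" -> "{ ( 5 7 8 ) | ( 6 9 10 ) }"
--     inner = s.strip()[1:-1].strip()
--     arms = _split_top_level_pipes(inner)  # 只在顶层切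
--     norm_arms = []
--     for arm in arms:
--         arm = arm.strip()
--         if not arm:
--             continue
--         if arm.startswith("(") and arm.endswith(")"):
--             norm_arms.append(_norm_paren_token(arm))
--         else:
--             # 兼容裸 "5|6|7" 或单个 "22"
--             parts = _split_top_level_pipes(arm)
--             nums = []
--             for p in parts:
--                 p = p.strip()
--                 if p.isdigit():
--                     nums.append(int(p))
--             if not nums:
--                 continue
--             norm_arms.append(str(nums[0]) if len(nums) == 1 else "( " + " ".join(map(str, nums)) + " )")
--     if not norm_arms:
--         return "{ }"
--     return "{ " + " | ".join(norm_arms) + " }"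
-- ===== SOURCE B (Python) =====
-- # B: split the body on every '|', then merge pipe-separated pieces until brackets balance;
-- # render each arm's digit tokens with a shared join helper.
-- def _balance(t: str) -> int:
--     return sum(c in "({" for c in t) - sum(c in ")}" for c in t)
--
-- def _top_arms(s: str) -> list[str]:
--     arms, cur, bal = [], None, 0
--     for piece in s.split("|"):
--         cur = piece if cur is None else cur + "|" + piece
--         bal += _balance(piece)
--         if bal == 0:
--             tok = cur.strip()
--             if tok:
--                 arms.append(tok)
--             cur = None
--     if cur is not None:
--         tok = cur.strip()
--         if tok:
--             arms.append(tok)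
--     return arms
--
-- def _join_nums(nums: list[int]) -> str:
--     return str(nums[0]) if len(nums) == 1 else "( " + " ".join(map(str, nums)) + " )"
--
-- def _norm_brace_token(s: str) -> str:
--     inner = s.strip()[1:-1].strip()
--     rendered = []
--     for arm in _top_arms(inner):
--         if arm.startswith("(") and arm.endswith(")"):
--             nums = [int(x) for x in arm[1:-1].strip().split("|") if x.strip().isdigit()]
--             rendered.append(_join_nums(nums) if nums else "( )")
--         else:
--             nums = [int(p) for p in _top_arms(arm) if p.isdigit()]
--             if nums:
--                 rendered.append(_join_nums(nums))
--     if not rendered: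
--         return "{ }"
--     return "{ " + " | ".join(rendered) + " }"
-- ===== Notes on version B (the rewrite author's own statement) =====
-- stated objective: alternative
-- what changed: B replaces A's character-by-character loop with string buffers and a depth counter by splitting the brace body on every '|' and then merging consecutive pieces until their accumulated bracket balance is zero, rendering arms with a shared join helper.
import Mathlib
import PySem

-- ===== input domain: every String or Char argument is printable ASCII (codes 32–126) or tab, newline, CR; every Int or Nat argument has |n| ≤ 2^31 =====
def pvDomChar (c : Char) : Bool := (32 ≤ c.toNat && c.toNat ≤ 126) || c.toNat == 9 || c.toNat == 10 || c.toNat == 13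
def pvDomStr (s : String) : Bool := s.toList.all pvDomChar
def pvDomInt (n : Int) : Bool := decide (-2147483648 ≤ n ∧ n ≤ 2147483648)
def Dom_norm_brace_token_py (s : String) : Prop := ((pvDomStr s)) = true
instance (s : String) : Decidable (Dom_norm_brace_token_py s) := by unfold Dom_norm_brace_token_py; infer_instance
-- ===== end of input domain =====

-- B splits the brace body on every '|' and merges pipe-separated pieces until brackets balance,
-- instead of A's character loop with buffers and a depth counter; equal return value proved (objective: alternative).


-- ===== PORT A =====
-- tok = "".join(buf).strip(); if tok: out.append(tok)
def pvStripTok (buf : List Char) : List (List Char) :=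
  let t := PySem.Chars.strip buf
  if t = [] then [] else [t]

-- one step of A's depth-counting loop over characters (state: out, buf, lvl)
def pvStepA (st : List (List Char) × List Char × Int) (c : Char) : List (List Char) × List Char × Int :=
  if c = '(' ∨ c = '{' then (st.1, st.2.1 ++ [c], st.2.2 + 1)
  else if c = ')' ∨ c = '}' then (st.1, st.2.1 ++ [c], st.2.2 - 1)
  else if c = '|' ∧ st.2.2 = 0 then (st.1 ++ pvStripTok st.2.1, [], st.2.2)
  else (st.1, st.2.1 ++ [c], st.2.2)

-- _split_top_level_pipes
def pvSplitTopA (cs : List Char) : List (List Char) :=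
  let st := cs.foldl pvStepA ([], [], 0)
  st.1 ++ pvStripTok st.2.1

-- _norm_paren_token; int(x) is guarded by x.strip().isdigit(), so it never raises (getD unreachable)
def pvNormParenA (a : List Char) : List Char :=
  let inner := PySem.Chars.strip (PySem.List.slice (PySem.Chars.strip a) (some 1) (some (-1)))
  let nums := ((PySem.Chars.splitOn inner ['|']).filter
      (fun x => PySem.Chars.strIsdigit (PySem.Chars.strip x))).map
      (fun x => (PySem.Int.ofChars? x).getD 0)
  match nums with
  | [] => "( )".toList
  | [n] => PySem.Int.toChars n
  | _ => "( ".toList ++ PySem.Chars.join [' '] (nums.map PySem.Int.toChars) ++ " )".toList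

def pvBareNumsA (arm : List Char) : List Int :=
  (pvSplitTopA arm).foldl (fun ns p0 =>
    if PySem.Chars.strIsdigit (PySem.Chars.strip p0) then
      ns ++ [(PySem.Int.ofChars? (PySem.Chars.strip p0)).getD 0]
    else ns) []

def norm_brace_token_py (s : String) : String :=
  let inner := PySem.Chars.strip (PySem.List.slice (PySem.Chars.strip s.toList) (some 1) (some (-1)))
  let arms := pvSplitTopA inner
  let normArms := arms.foldl (fun acc arm0 =>
    if PySem.Chars.strip arm0 = [] then acc
    else if PySem.Chars.startswith (PySem.Chars.strip arm0) ['('] &&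
        PySem.Chars.endswith (PySem.Chars.strip arm0) [')'] then
      acc ++ [pvNormParenA (PySem.Chars.strip arm0)]
    else if pvBareNumsA (PySem.Chars.strip arm0) = [] then acc
    else acc ++ [match pvBareNumsA (PySem.Chars.strip arm0) with
      | [n] => PySem.Int.toChars n
      | _ => "( ".toList ++
          PySem.Chars.join [' '] ((pvBareNumsA (PySem.Chars.strip arm0)).map PySem.Int.toChars) ++
          " )".toList]) []
  if normArms = [] then "{ }"
  else String.mk ("{ ".toList ++ PySem.Chars.join " | ".toList normArms ++ " }".toList)

-- ===== PORT B =====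
-- _balance: sum(c in "({" for c in t) - sum(c in ")}" for c in t)
def pvBalance (t : List Char) : Int :=
  ((t.countP (fun c => c == '(' || c == '{') : Nat) : Int)
    - ((t.countP (fun c => c == ')' || c == '}') : Nat) : Int)

-- one step of _top_arms' loop over the pieces of s.split("|") (state: arms, cur, bal);
-- tok = cur.strip(); if tok: arms.append(tok)
def pvStepB (st : List (List Char) × Option (List Char) × Int) (piece : List Char) :
    List (List Char) × Option (List Char) × Int :=
  let cur := match st.2.1 with | none => piece | some c0 => c0 ++ '|' :: piece
  let bal := st.2.2 + pvBalance piece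
  if bal = 0 then
    (if PySem.Chars.strip cur = [] then st.1 else st.1 ++ [PySem.Chars.strip cur], none, bal)
  else (st.1, some cur, bal)

-- _top_arms
def pvTopArmsB (s : List Char) : List (List Char) :=
  let st := (PySem.Chars.splitOn s ['|']).foldl pvStepB ([], none, 0)
  match st.2.1 with
  | none => st.1
  | some cur =>
    if PySem.Chars.strip cur = [] then st.1 else st.1 ++ [PySem.Chars.strip cur]

-- _join_nums; nums[0] is guarded by len(nums) == 1, so it never raises (getD unreachable)
def pvJoinNums (nums : List Int) : List Char :=
  if nums.length = 1 then PySem.Int.toChars ((PySem.List.pyGet? nums 0).getD 0)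
  else "( ".toList ++ PySem.Chars.join [' '] (nums.map PySem.Int.toChars) ++ " )".toList

def norm_brace_token_py_alt (s : String) : String :=
  let inner := PySem.Chars.strip (PySem.List.slice (PySem.Chars.strip s.toList) (some 1) (some (-1)))
  let rendered := (pvTopArmsB inner).foldl (fun acc arm =>
    if PySem.Chars.startswith arm ['('] && PySem.Chars.endswith arm [')'] then
      let nums := ((PySem.Chars.splitOn (PySem.Chars.strip (PySem.List.slice arm (some 1) (some (-1)))) ['|']).filter
          (fun x => PySem.Chars.strIsdigit (PySem.Chars.strip x))).map
          (fun x => (PySem.Int.ofChars? x).getD 0)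
      acc ++ [if nums = [] then "( )".toList else pvJoinNums nums]
    else
      let nums := ((pvTopArmsB arm).filter (fun p => PySem.Chars.strIsdigit p)).map
          (fun p => (PySem.Int.ofChars? p).getD 0)
      if nums = [] then acc else acc ++ [pvJoinNums nums]) []
  if rendered = [] then "{ }"
  else String.mk ("{ ".toList ++ PySem.Chars.join " | ".toList rendered ++ " }".toList)

-- ===== PRECONDITION & SPEC =====
def Spec_norm_brace_token_py (s : String) (out : String) : Prop := out = norm_brace_token_py_alt s
instance (s : String) (out : String) : Decidable (Spec_norm_brace_token_py s out) := by unfold Spec_norm_brace_token_py; infer_instance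

-- ===== CLAIM (what is proved, stated in full; the proofs are below) =====
def Claim_equal_norm_brace_token_py : Prop := ∀ (s : String), Dom_norm_brace_token_py s → Spec_norm_brace_token_py s (norm_brace_token_py s)

-- ===== LEMMAS AND PROOFS =====

-- A's splitter as a structural recursion over the characters (proof-side mirror of pvStepA)
def pvArmsT (buf : List Char) (lvl : Int) : List Char → List (List Char)
  | [] => pvStripTok buf
  | c :: cs =>
    if c = '(' ∨ c = '{' then pvArmsT (buf ++ [c]) (lvl + 1) cs
    else if c = ')' ∨ c = '}' then pvArmsT (buf ++ [c]) (lvl - 1) cs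
    else if c = '|' ∧ lvl = 0 then pvStripTok buf ++ pvArmsT [] 0 cs
    else pvArmsT (buf ++ [c]) lvl cs

-- flush helper (proof-side): the stripped token if non-empty
def pvTokB (cur : List Char) : List (List Char) :=
  if PySem.Chars.strip cur = [] then [] else [PySem.Chars.strip cur]

-- B's merging loop as a structural recursion over the piece list (proof-side mirror of pvStepB)
def pvBRec (cur : Option (List Char)) (bal : Int) : List (List Char) → List (List Char)
  | [] => match cur with | none => [] | some c => pvTokB c
  | p :: ps =>
    let c := match cur with | none => p | some c0 => c0 ++ '|' :: p
    let b := bal + pvBalance p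
    if b = 0 then pvTokB c ++ pvBRec none b ps else pvBRec (some c) b ps

-- B's treatment of a piece list whose first piece is prefixed by pending chars `buf`
def pvBCont (buf : List Char) (lvl : Int) : List (List Char) → List (List Char)
  | [] => pvTokB buf
  | p :: ps =>
    let c := buf ++ p
    let b := lvl + pvBalance p
    if b = 0 then pvTokB c ++ pvBRec none b ps else pvBRec (some c) b ps

-- Python's s.split("|") (PySem fuel loop) computes List.splitOnP on '|'
lemma pv_go_eq : ∀ (fuel : Nat) (l : List Char), l.length < fuel → ∀ (cur : List Char) (acc : List (List Char)),
    PySem.Chars.splitOn.go ['|'] fuel l cur acc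
      = acc.reverse ++ (List.splitOnP (fun c => c == '|') l).modifyHead (cur.reverse ++ ·) := by
  intro fuel
  induction fuel with
  | zero => intro l h; omega
  | succ f ih =>
    intro l h cur acc
    cases l with
    | nil =>
      rw [PySem.Chars.splitOn.go] <;> simp [List.splitOnP_nil]
    | cons c rest =>
      rw [PySem.Chars.splitOn.go]
      simp only [List.length_cons] at h
      by_cases hc : c = '|'
      · subst hc
        rw [if_pos (by simp [List.isPrefixOf])]
        have hd : List.drop (['|'] : List Char).length ('|' :: rest) = rest := by simp
        rw [hd, ih rest (by omega) [] (cur.reverse :: acc)]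
        rw [List.splitOnP_cons]
        obtain ⟨q, qs, hq⟩ := List.exists_cons_of_ne_nil (List.splitOnP_ne_nil (fun c => c == '|') rest)
        rw [hq]; simp
      · rw [if_neg (by simp [List.isPrefixOf]; intro h'; exact hc h'.symm)]
        rw [ih rest (by omega) (c :: cur) acc]
        rw [List.splitOnP_cons]
        obtain ⟨q, qs, hq⟩ := List.exists_cons_of_ne_nil (List.splitOnP_ne_nil (fun c => c == '|') rest)
        rw [hq]
        rw [if_neg (by simp [hc])]
        simp

lemma pv_splitOn_eq (cs : List Char) :
    PySem.Chars.splitOn cs ['|'] = List.splitOnP (fun c => c == '|') cs := by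
  show PySem.Chars.splitOn.go ['|'] (cs.length + 1) cs [] [] = _
  rw [pv_go_eq (cs.length + 1) cs (by omega) [] []]
  obtain ⟨q, qs, hq⟩ := List.exists_cons_of_ne_nil (List.splitOnP_ne_nil (fun c => c == '|') cs)
  rw [hq]; simp

-- strip is idempotent
lemma pv_dropWhile_idem (p : Char → Bool) (l : List Char) :
    (l.dropWhile p).dropWhile p = l.dropWhile p := by
  induction l with
  | nil => simp
  | cons c t ih =>
    by_cases h : p c <;> simp [List.dropWhile_cons, h, ih]

lemma pv_dropWhile_head (p : Char → Bool) :
    ∀ (l : List Char) (c : Char) (t : List Char), l.dropWhile p = c :: t → p c = false := by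
  intro l
  induction l with
  | nil => intro c t h; simp at h
  | cons a l' ih =>
    intro c t h
    by_cases ha : p a
    · exact ih c t (by simpa [List.dropWhile_cons, ha] using h)
    · simp [List.dropWhile_cons, ha] at h
      rw [← h.1]; simpa using ha

lemma pv_rstrip_prefix (l : List Char) : PySem.Chars.rstrip l <+: l := by
  have h := List.dropWhile_suffix (l := l.reverse) (p := PySem.Chars.isspace)
  have h2 := List.reverse_prefix.mpr h
  simpa [PySem.Chars.rstrip] using h2

lemma pv_rstrip_idem (l : List Char) :
    PySem.Chars.rstrip (PySem.Chars.rstrip l) = PySem.Chars.rstrip l := by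
  simp [PySem.Chars.rstrip, pv_dropWhile_idem]

lemma pv_strip_idem (l : List Char) :
    PySem.Chars.strip (PySem.Chars.strip l) = PySem.Chars.strip l := by
  have hmid : PySem.Chars.lstrip (PySem.Chars.rstrip (PySem.Chars.lstrip l))
      = PySem.Chars.rstrip (PySem.Chars.lstrip l) := by
    cases h : PySem.Chars.lstrip l with
    | nil => simp [PySem.Chars.rstrip, PySem.Chars.lstrip]
    | cons c t =>
      have hc : PySem.Chars.isspace c = false :=
        pv_dropWhile_head PySem.Chars.isspace l c t (by simpa [PySem.Chars.lstrip] using h)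
      have hpre := pv_rstrip_prefix (c :: t)
      cases hr : PySem.Chars.rstrip (c :: t) with
      | nil => simp [PySem.Chars.lstrip]
      | cons d u =>
        rw [hr] at hpre
        obtain ⟨w, hw⟩ := hpre
        have hd : d = c := by simpa using congrArg (·.head?) hw
        subst hd
        simp [PySem.Chars.lstrip, List.dropWhile_cons, hc]
  show PySem.Chars.rstrip (PySem.Chars.lstrip (PySem.Chars.rstrip (PySem.Chars.lstrip l)))
      = PySem.Chars.rstrip (PySem.Chars.lstrip l)
  rw [hmid, pv_rstrip_idem]

lemma pvTokB_mem {t cur : List Char} (h : t ∈ pvTokB cur) :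
    t = PySem.Chars.strip cur ∧ t ≠ [] := by
  by_cases he : PySem.Chars.strip cur = [] <;> simp [pvTokB, he] at h <;> simp_all

-- balance of one more character
lemma pvBalance_opener {c : Char} (h : c = '(' ∨ c = '{') (p : List Char) :
    pvBalance (c :: p) = (pvBalance p) + 1 := by
  rcases h with rfl | rfl <;> simp [pvBalance, List.countP_cons] <;> push_cast <;> ring

lemma pvBalance_closer {c : Char} (h : c = ')' ∨ c = '}') (p : List Char) :
    pvBalance (c :: p) = (pvBalance p) - 1 := by
  rcases h with rfl | rfl <;> simp [pvBalance, List.countP_cons] <;> push_cast <;> ring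

lemma pvBalance_other {c : Char} (h1 : ¬(c = '(' ∨ c = '{')) (h2 : ¬(c = ')' ∨ c = '}'))
    (p : List Char) : pvBalance (c :: p) = pvBalance p := by
  push_neg at h1 h2
  simp [pvBalance, List.countP_cons, h1.1, h1.2, h2.1, h2.2]

-- B's fold, finished by the trailing flush, is the structural recursion pvBRec
def pvFinB (st : List (List Char) × Option (List Char) × Int) : List (List Char) :=
  match st.2.1 with
  | none => st.1
  | some cur =>
    if PySem.Chars.strip cur = [] then st.1 else st.1 ++ [PySem.Chars.strip cur]

lemma pvFoldB : ∀ (pieces : List (List Char)) (arms : List (List Char)) (cur : Option (List Char)) (bal : Int),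
    pvFinB (pieces.foldl pvStepB (arms, cur, bal)) = arms ++ pvBRec cur bal pieces := by
  intro pieces
  induction pieces with
  | nil =>
    intro arms cur bal
    cases cur <;> simp [pvFinB, pvBRec, pvTokB] <;> split_ifs <;> simp
  | cons p ps ih =>
    intro arms cur bal
    simp only [List.foldl_cons, pvStepB, pvBRec]
    by_cases hb : bal + pvBalance p = 0
    · rw [if_pos hb, if_pos hb, ih]
      simp only [pvTokB]
      split_ifs <;> simp
    · rw [if_neg hb, if_neg hb, ih]

-- head congruence for pvBCont on a non-empty piece list
lemma pvBCont_head_congr {buf1 buf2 p1 p2 : List Char} {l1 l2 : Int} (ps : List (List Char))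
    (hc : buf1 ++ p1 = buf2 ++ p2) (hb : l1 + pvBalance p1 = l2 + pvBalance p2) :
    pvBCont buf1 l1 (p1 :: ps) = pvBCont buf2 l2 (p2 :: ps) := by
  simp only [pvBCont, hc, hb]

lemma pvBCont_nilbuf (lvl : Int) (ps : List (List Char)) :
    pvBCont [] lvl ps = pvBRec none lvl ps := by
  cases ps with
  | nil => simp [pvBCont, pvBRec, pvTokB, PySem.Chars.strip, PySem.Chars.lstrip, PySem.Chars.rstrip]
  | cons p t => simp [pvBCont, pvBRec]

lemma pvBRec_some (c0 : List Char) (bal : Int) (p : List Char) (ps : List (List Char)) :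
    pvBRec (some c0) bal (p :: ps) = pvBCont (c0 ++ ['|']) bal (p :: ps) := by
  simp [pvBRec, pvBCont]

-- KEY: A's depth-counter recursion = B's merge of the '|'-split pieces
lemma pvArmsT_eq_BCont : ∀ (cs buf : List Char) (lvl : Int),
    pvArmsT buf lvl cs = pvBCont buf lvl (List.splitOnP (fun c => c == '|') cs) := by
  intro cs
  induction cs with
  | nil =>
    intro buf lvl
    rw [List.splitOnP_nil]
    simp only [pvArmsT, pvBCont, pvBRec]
    split_ifs <;> simp [pvStripTok, pvTokB]
  | cons c t ih =>
    intro buf lvl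
    obtain ⟨p, ps, hq⟩ := List.exists_cons_of_ne_nil (List.splitOnP_ne_nil (fun c => c == '|') t)
    rw [List.splitOnP_cons]
    by_cases hO : c = '(' ∨ c = '{'
    · have hcp : ((fun c => c == '|') c) = false := by rcases hO with rfl | rfl <;> decide
      rw [if_neg (by simp [hcp]), hq]
      simp only [List.modifyHead_cons]
      have hA : pvArmsT buf lvl (c :: t) = pvArmsT (buf ++ [c]) (lvl + 1) t := by
        simp only [pvArmsT]; rw [if_pos hO]
      rw [hA, ih (buf ++ [c]) (lvl + 1), hq]
      exact pvBCont_head_congr ps (by simp) (by rw [pvBalance_opener hO]; ring)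
    · by_cases hC : c = ')' ∨ c = '}'
      · have hcp : ((fun c => c == '|') c) = false := by rcases hC with rfl | rfl <;> decide
        rw [if_neg (by simp [hcp]), hq]
        simp only [List.modifyHead_cons]
        have hA : pvArmsT buf lvl (c :: t) = pvArmsT (buf ++ [c]) (lvl - 1) t := by
          simp only [pvArmsT]; rw [if_neg hO, if_pos hC]
        rw [hA, ih (buf ++ [c]) (lvl - 1), hq]
        exact pvBCont_head_congr ps (by simp) (by rw [pvBalance_closer hC]; ring)
      · by_cases hP : c = '|'
        · subst hP
          rw [if_pos (by decide), hq]
          by_cases hl : lvl = 0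
          · subst hl
            have hA : pvArmsT buf 0 ('|' :: t) = pvStripTok buf ++ pvArmsT [] 0 t := by
              simp [pvArmsT]
            rw [hA, ih [] 0, hq]
            have hR : pvBCont buf 0 ([] :: p :: ps)
                = pvTokB buf ++ pvBRec none 0 (p :: ps) := by
              simp [pvBCont, pvBalance]
            rw [hR, pvBCont_nilbuf, pvStripTok, pvTokB]
          · have hA : pvArmsT buf lvl ('|' :: t) = pvArmsT (buf ++ ['|']) lvl t := by
              simp only [pvArmsT]
              rw [if_neg (by simp), if_neg (by simp), if_neg (by simp [hl])]
            rw [hA, ih (buf ++ ['|']) lvl, hq]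
            have hR : pvBCont buf lvl ([] :: p :: ps) = pvBRec (some buf) lvl (p :: ps) := by
              have : lvl + pvBalance [] = lvl := by simp [pvBalance]
              simp only [pvBCont, List.append_nil, this]
              rw [if_neg hl]
            rw [hR, pvBRec_some]
        · have hcp : ((fun c => c == '|') c) = false := by simp [hP]
          rw [if_neg (by simp [hcp]), hq]
          simp only [List.modifyHead_cons]
          have hA : pvArmsT buf lvl (c :: t) = pvArmsT (buf ++ [c]) lvl t := by
            simp only [pvArmsT]
            rw [if_neg hO, if_neg hC, if_neg (by simp [hP])]
          rw [hA, ih (buf ++ [c]) lvl, hq]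
          exact pvBCont_head_congr ps (by simp) (by rw [pvBalance_other hO hC])

-- A's foldl splitter equals the structural pvArmsT (same as before)
lemma pvSplitTopA_foldl : ∀ (cs : List Char) (out : List (List Char)) (buf : List Char) (lvl : Int),
    (cs.foldl pvStepA (out, buf, lvl)).1 ++ pvStripTok (cs.foldl pvStepA (out, buf, lvl)).2.1
      = out ++ pvArmsT buf lvl cs := by
  intro cs
  induction cs with
  | nil => intro out buf lvl; simp [pvArmsT]
  | cons c t ih =>
    intro out buf lvl
    by_cases hO : c = '(' ∨ c = '{'
    · have e : pvStepA (out, buf, lvl) c = (out, buf ++ [c], lvl + 1) := by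
        simp only [pvStepA]; rw [if_pos hO]
      have eT : pvArmsT buf lvl (c :: t) = pvArmsT (buf ++ [c]) (lvl + 1) t := by
        simp only [pvArmsT]; rw [if_pos hO]
      rw [List.foldl_cons, e, eT]
      exact ih out (buf ++ [c]) (lvl + 1)
    · by_cases hC : c = ')' ∨ c = '}'
      · have e : pvStepA (out, buf, lvl) c = (out, buf ++ [c], lvl - 1) := by
          simp only [pvStepA]; rw [if_neg hO, if_pos hC]
        have eT : pvArmsT buf lvl (c :: t) = pvArmsT (buf ++ [c]) (lvl - 1) t := by
          simp only [pvArmsT]; rw [if_neg hO, if_pos hC]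
        rw [List.foldl_cons, e, eT]
        exact ih out (buf ++ [c]) (lvl - 1)
      · by_cases hp : c = '|' ∧ lvl = 0
        · obtain ⟨rfl, rfl⟩ := hp
          have e : pvStepA (out, buf, 0) '|' = (out ++ pvStripTok buf, [], 0) := by
            simp [pvStepA]
          have eT : pvArmsT buf 0 ('|' :: t) = pvStripTok buf ++ pvArmsT [] 0 t := by
            simp [pvArmsT]
          rw [List.foldl_cons, e, eT]
          exact (ih (out ++ pvStripTok buf) [] 0).trans (by simp)
        · have e : pvStepA (out, buf, lvl) c = (out, buf ++ [c], lvl) := by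
            simp only [pvStepA]; rw [if_neg hO, if_neg hC, if_neg hp]
          have eT : pvArmsT buf lvl (c :: t) = pvArmsT (buf ++ [c]) lvl t := by
            simp only [pvArmsT]; rw [if_neg hO, if_neg hC, if_neg hp]
          rw [List.foldl_cons, e, eT]
          exact ih out (buf ++ [c]) lvl

-- the chain: A's splitter = B's split-and-merge
lemma pvSplit_eq_arms (cs : List Char) : pvSplitTopA cs = pvTopArmsB cs := by
  have h := pvSplitTopA_foldl cs [] [] 0
  simp only [List.nil_append] at h
  rw [pvSplitTopA]
  rw [h, pvArmsT_eq_BCont, pvBCont_nilbuf]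
  show _ = pvFinB ((PySem.Chars.splitOn cs ['|']).foldl pvStepB ([], none, 0))
  rw [pv_splitOn_eq, pvFoldB]
  simp

-- every arm produced by the merge is stripped and non-empty
lemma pvBRec_mem : ∀ (pieces : List (List Char)) (cur : Option (List Char)) (bal : Int)
    (x : List Char), x ∈ pvBRec cur bal pieces → PySem.Chars.strip x = x ∧ x ≠ [] := by
  intro pieces
  induction pieces with
  | nil =>
    intro cur bal x hx
    cases cur with
    | none => simp [pvBRec] at hx
    | some c =>
      simp only [pvBRec] at hx
      obtain ⟨h1, h2⟩ := pvTokB_mem hx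
      exact ⟨by rw [h1, pv_strip_idem], h2⟩
  | cons p ps ih =>
    intro cur bal x hx
    simp only [pvBRec] at hx
    split_ifs at hx
    · rcases List.mem_append.mp hx with h | h
      · obtain ⟨h1, h2⟩ := pvTokB_mem h
        exact ⟨by rw [h1, pv_strip_idem], h2⟩
      · exact ih _ _ x h
    · exact ih _ _ x hx

lemma pvTopArmsB_mem {cs x : List Char} (h : x ∈ pvTopArmsB cs) :
    PySem.Chars.strip x = x ∧ x ≠ [] := by
  have h2 : x ∈ pvBRec none 0 (List.splitOnP (fun c => c == '|') cs) := by
    have : pvTopArmsB cs = pvBRec none 0 (List.splitOnP (fun c => c == '|') cs) := by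
      show pvFinB ((PySem.Chars.splitOn cs ['|']).foldl pvStepB ([], none, 0)) = _
      rw [pv_splitOn_eq, pvFoldB]; simp
    rwa [this] at h
  exact pvBRec_mem _ none 0 x h2

-- A's per-arm contribution as a list of zero or one rendered tokens
def pvOptA (arm0 : List Char) : List (List Char) :=
  if PySem.Chars.strip arm0 = [] then []
  else if PySem.Chars.startswith (PySem.Chars.strip arm0) ['('] &&
      PySem.Chars.endswith (PySem.Chars.strip arm0) [')'] then
    [pvNormParenA (PySem.Chars.strip arm0)]
  else if pvBareNumsA (PySem.Chars.strip arm0) = [] then []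
  else [match pvBareNumsA (PySem.Chars.strip arm0) with
    | [n] => PySem.Int.toChars n
    | _ => "( ".toList ++
        PySem.Chars.join [' '] ((pvBareNumsA (PySem.Chars.strip arm0)).map PySem.Int.toChars) ++
        " )".toList]

-- B's per-arm contribution
def pvOptB (arm : List Char) : List (List Char) :=
  if PySem.Chars.startswith arm ['('] && PySem.Chars.endswith arm [')'] then
    let nums := ((PySem.Chars.splitOn (PySem.Chars.strip (PySem.List.slice arm (some 1) (some (-1)))) ['|']).filter
        (fun x => PySem.Chars.strIsdigit (PySem.Chars.strip x))).map
        (fun x => (PySem.Int.ofChars? x).getD 0)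
    [if nums = [] then "( )".toList else pvJoinNums nums]
  else
    let nums := ((pvTopArmsB arm).filter (fun p => PySem.Chars.strIsdigit p)).map
        (fun p => (PySem.Int.ofChars? p).getD 0)
    if nums = [] then [] else [pvJoinNums nums]

-- A's loop body appends exactly the per-arm contribution
lemma pv_step_outer (acc : List (List Char)) (arm0 : List Char) :
    (if PySem.Chars.strip arm0 = [] then acc
     else if PySem.Chars.startswith (PySem.Chars.strip arm0) ['('] &&
         PySem.Chars.endswith (PySem.Chars.strip arm0) [')'] then
       acc ++ [pvNormParenA (PySem.Chars.strip arm0)]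
     else if pvBareNumsA (PySem.Chars.strip arm0) = [] then acc
     else acc ++ [match pvBareNumsA (PySem.Chars.strip arm0) with
       | [n] => PySem.Int.toChars n
       | _ => "( ".toList ++
           PySem.Chars.join [' '] ((pvBareNumsA (PySem.Chars.strip arm0)).map PySem.Int.toChars) ++
           " )".toList])
    = acc ++ pvOptA arm0 := by
  simp only [pvOptA]
  split_ifs <;> simp

-- A's whole loop = flatMap of per-arm contributions
lemma pv_foldl_optA (l : List (List Char)) : ∀ (init : List (List Char)),
    l.foldl (fun acc arm0 =>
      if PySem.Chars.strip arm0 = [] then acc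
      else if PySem.Chars.startswith (PySem.Chars.strip arm0) ['('] &&
          PySem.Chars.endswith (PySem.Chars.strip arm0) [')'] then
        acc ++ [pvNormParenA (PySem.Chars.strip arm0)]
      else if pvBareNumsA (PySem.Chars.strip arm0) = [] then acc
      else acc ++ [match pvBareNumsA (PySem.Chars.strip arm0) with
        | [n] => PySem.Int.toChars n
        | _ => "( ".toList ++
            PySem.Chars.join [' '] ((pvBareNumsA (PySem.Chars.strip arm0)).map PySem.Int.toChars) ++
            " )".toList]) init
      = init ++ l.flatMap pvOptA := by
  induction l with
  | nil => intro init; simp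
  | cons a t ih =>
    intro init
    simp only [List.foldl_cons, List.flatMap_cons]
    rw [pv_step_outer init a, ih (init ++ pvOptA a), List.append_assoc]

-- B's whole loop = flatMap of per-arm contributions
lemma pv_foldl_optB (l : List (List Char)) : ∀ (init : List (List Char)),
    l.foldl (fun acc arm =>
      if PySem.Chars.startswith arm ['('] && PySem.Chars.endswith arm [')'] then
        let nums := ((PySem.Chars.splitOn (PySem.Chars.strip (PySem.List.slice arm (some 1) (some (-1)))) ['|']).filter
            (fun x => PySem.Chars.strIsdigit (PySem.Chars.strip x))).map
            (fun x => (PySem.Int.ofChars? x).getD 0)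
        acc ++ [if nums = [] then "( )".toList else pvJoinNums nums]
      else
        let nums := ((pvTopArmsB arm).filter (fun p => PySem.Chars.strIsdigit p)).map
            (fun p => (PySem.Int.ofChars? p).getD 0)
        if nums = [] then acc else acc ++ [pvJoinNums nums]) init
      = init ++ l.flatMap pvOptB := by
  induction l with
  | nil => intro init; simp
  | cons a t ih =>
    intro init
    simp only [List.foldl_cons, List.flatMap_cons]
    have hstep : (if PySem.Chars.startswith a ['('] && PySem.Chars.endswith a [')'] then
        let nums := ((PySem.Chars.splitOn (PySem.Chars.strip (PySem.List.slice a (some 1) (some (-1)))) ['|']).filter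
            (fun x => PySem.Chars.strIsdigit (PySem.Chars.strip x))).map
            (fun x => (PySem.Int.ofChars? x).getD 0)
        init ++ [if nums = [] then "( )".toList else pvJoinNums nums]
      else
        let nums := ((pvTopArmsB a).filter (fun p => PySem.Chars.strIsdigit p)).map
            (fun p => (PySem.Int.ofChars? p).getD 0)
        if nums = [] then init else init ++ [pvJoinNums nums])
        = init ++ pvOptB a := by
      simp only [pvOptB]
      split_ifs <;> simp
    rw [hstep, ih (init ++ pvOptB a), List.append_assoc]

-- A's digit loop over the split arms = B's filter-then-int map
lemma pv_bareNums_eq (arm0 : List Char) :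
    pvBareNumsA arm0 = ((pvTopArmsB arm0).filter
      (fun p => PySem.Chars.strIsdigit p)).map (fun p => (PySem.Int.ofChars? p).getD 0) := by
  have hfun : ∀ (acc : List Int) (x : List Char), x ∈ pvSplitTopA arm0 →
      (if PySem.Chars.strIsdigit (PySem.Chars.strip x) then
        acc ++ [(PySem.Int.ofChars? (PySem.Chars.strip x)).getD 0]
      else acc)
      = (if PySem.Chars.strIsdigit x then acc ++ [(PySem.Int.ofChars? x).getD 0] else acc) := by
    intro acc x hx
    rw [pvSplit_eq_arms] at hx
    rw [(pvTopArmsB_mem hx).1]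
  rw [pvBareNumsA, PySem.List.foldl_congr_mem (pvSplitTopA arm0)
    (fun ns p0 =>
      if PySem.Chars.strIsdigit (PySem.Chars.strip p0) then
        ns ++ [(PySem.Int.ofChars? (PySem.Chars.strip p0)).getD 0]
      else ns)
    (fun ns p0 =>
      if PySem.Chars.strIsdigit p0 then ns ++ [(PySem.Int.ofChars? p0).getD 0] else ns)
    [] hfun]
  rw [PySem.List.foldl_append_if (fun p => PySem.Chars.strIsdigit p)
    (fun p => (PySem.Int.ofChars? p).getD 0) (pvSplitTopA arm0) []]
  rw [pvSplit_eq_arms arm0]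
  simp

-- on a stripped non-empty arm, A's contribution = B's
lemma pv_arm_eq (arm0 : List Char) (hs : PySem.Chars.strip arm0 = arm0) (hne : arm0 ≠ []) :
    pvOptA arm0 = pvOptB arm0 := by
  by_cases hparen : PySem.Chars.startswith arm0 ['('] && PySem.Chars.endswith arm0 [')']
  · simp only [pvOptA, pvOptB, pvNormParenA, hs, hparen, if_neg hne, if_true]
    cases hnn : ((PySem.Chars.splitOn
        (PySem.Chars.strip (PySem.List.slice arm0 (some 1) (some (-1)))) ['|']).filter
        (fun x => PySem.Chars.strIsdigit (PySem.Chars.strip x))).map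
        (fun x => (PySem.Int.ofChars? x).getD 0) with
    | nil => simp [pvJoinNums]
    | cons a l =>
      cases l with
      | nil => simp [pvJoinNums, PySem.List.pyGet?, PySem.List.pyIdx?]
      | cons b m => simp [pvJoinNums, PySem.List.pyGet?, PySem.List.pyIdx?]
  · simp only [pvOptA, pvOptB, hs, hparen, if_neg hne, Bool.false_eq_true, if_false,
      pv_bareNums_eq]
    cases hnn : ((pvTopArmsB arm0).filter
        (fun p => PySem.Chars.strIsdigit p)).map (fun p => (PySem.Int.ofChars? p).getD 0) with
    | nil => simp [pvJoinNums]
    | cons a l =>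
      cases l with
      | nil => simp [pvJoinNums, PySem.List.pyGet?, PySem.List.pyIdx?]
      | cons b m => simp [pvJoinNums, PySem.List.pyGet?, PySem.List.pyIdx?]

-- contribution equality along a list of stripped, non-empty arms
lemma pv_flatMap_eq (l : List (List Char)) (h : ∀ x ∈ l, PySem.Chars.strip x = x ∧ x ≠ []) :
    l.flatMap pvOptA = l.flatMap pvOptB := by
  induction l with
  | nil => rfl
  | cons a t ih =>
    simp only [List.flatMap_cons]
    rw [pv_arm_eq a (h a (by simp)).1 (h a (by simp)).2, ih (fun x hx => h x (by simp [hx]))]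


-- ===== VERDICT (by name: the statement is the Claim_ definition above) =====
theorem norm_brace_token_py_spec : Claim_equal_norm_brace_token_py := by
  intro s _
  show norm_brace_token_py s = norm_brace_token_py_alt s
  simp only [norm_brace_token_py, norm_brace_token_py_alt]
  generalize PySem.Chars.strip
    (PySem.List.slice (PySem.Chars.strip s.toList) (some 1) (some (-1))) = inner
  rw [pv_foldl_optA (pvSplitTopA inner) [], pv_foldl_optB (pvTopArmsB inner) [],
    pvSplit_eq_arms inner,
    pv_flatMap_eq (pvTopArmsB inner) (fun x hx => pvTopArmsB_mem hx)]
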